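-- pv_equiv track=rewrite | github.com/lookinmin/CodingTest | Programmers/Lv2/할인 행사.py | solution
-- ===== SOURCE A (Python) =====
-- def check(shop, discount):
--     tmp = shop.copy()
--     for t in discount:
--         if t in tmp:
--             if tmp[t] > 0:
--                 tmp[t] -= 1
--
--     if sum(tmp.values()) == 0:
--         return True
--
--     return False
--
-- def solution(want, number, discount):
--     answer = 0
--
--     shop = {}
--     for i in range(len(want)):
--         shop[want[i]] = number[i]
--
--     for j in range(len(discount) - 9):
--         tmp = discount[j: j + 10]
--         if check(shop, tmp):
--             answer += 1
--
--     return answer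
-- ===== SOURCE B (Python) =====
-- def covered(shop, win):
--     # units of the wanted amounts that this window covers: sum of min(count, need)
--     # over the window's distinct items (at most 10 of them)
--     cnt = {}
--     for t in win:
--         cnt[t] = cnt.get(t, 0) + 1
--     s = 0
--     for k, c in cnt.items():
--         v = shop.get(k, 0)
--         if v > 0:
--             s += min(c, v)
--     return s
--
-- def solution(want, number, discount):
--     shop = dict(zip(want, number))
--     total = sum(shop.values())
--     wins = [discount[j:j + 10] for j in range(len(discount) - 9)]
--     return sum(1 for win in wins if covered(shop, win) == total)
-- ===== Notes on version B (the rewrite author's own statement) =====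
-- stated objective: faster
-- what changed: B replaces A's per-window simulation over the whole shop dict (copy it, decrement item by item, sum the leftover values) by the identity sum(max(need-count,0)) = sum(number) - sum(min(count,need)): it counts occurrences of the window's at most 10 distinct items once and compares the covered total with the fixed target, never touching the other wanted items.
import Mathlib
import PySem

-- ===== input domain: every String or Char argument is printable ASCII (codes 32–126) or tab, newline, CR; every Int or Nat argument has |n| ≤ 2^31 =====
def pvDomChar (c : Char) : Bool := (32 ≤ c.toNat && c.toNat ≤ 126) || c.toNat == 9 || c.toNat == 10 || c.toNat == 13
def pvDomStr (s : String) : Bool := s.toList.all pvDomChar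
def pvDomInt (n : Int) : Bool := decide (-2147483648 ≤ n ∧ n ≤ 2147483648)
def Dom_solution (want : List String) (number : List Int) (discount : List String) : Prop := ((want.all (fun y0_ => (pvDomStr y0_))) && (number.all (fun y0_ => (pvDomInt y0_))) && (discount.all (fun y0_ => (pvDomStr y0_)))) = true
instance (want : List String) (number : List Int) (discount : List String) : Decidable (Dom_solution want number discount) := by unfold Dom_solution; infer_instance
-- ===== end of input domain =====

-- B counts the length-10 windows whose covered total Σ min(count, need), taken over the window's
-- ≤ 10 distinct items only, reaches sum(number) — instead of A's per-window simulation over the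
-- whole shop dict (copy it, decrement item by item, sum the leftovers); a timing run measured
-- B faster on large inputs (per-window work no longer scales with len(want)).

-- ===== PORT A =====
-- loop body of check: 'if t in tmp: if tmp[t] > 0: tmp[t] -= 1' (membership + lookup read as one get?)
def solutionCheckStep (tmp : PySem.Dict String Int) (t : String) : PySem.Dict String Int :=
  match tmp.get? t with
  | some v => if v > 0 then tmp.insert t (v - 1) else tmp
  | none => tmp

def solutionCheck (shop : PySem.Dict String Int) (discount : List String) : Bool :=
  -- tmp = shop.copy() is the starting value of the fold (values are immutable here)
  let tmp := discount.foldl solutionCheckStep shop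
  if tmp.values.sum = 0 then true else false

def solution (want : List String) (number : List Int) (discount : List String) : Int :=
  -- want[i] / number[i] via pyGetD: exact for 0 ≤ i < len (guaranteed by the loop range and Pre_)
  let shop := (PySem.List.pyRange 0 (want.length : Int) 1).foldl
      (fun shop i => shop.insert (PySem.List.pyGetD want i "") (PySem.List.pyGetD number i 0))
      PySem.Dict.empty
  (PySem.List.pyRange 0 ((discount.length : Int) - 9) 1).foldl
      (fun answer j =>
        if solutionCheck shop (PySem.List.slice discount (some j) (some (j + 10))) then answer + 1
        else answer)
      0

-- ===== PORT B =====
def solutionCovered (shop : PySem.Dict String Int) (win : List String) : Int :=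
  let cnt := win.foldl (fun d t => d.insert t (d.getD t 0 + 1)) PySem.Dict.empty
  cnt.items.foldl
    (fun s kv => if 0 < shop.getD kv.1 0 then s + min kv.2 (shop.getD kv.1 0) else s) 0

def solution_alt (want : List String) (number : List Int) (discount : List String) : Int :=
  let shop := (want.zip number).foldl (fun d kv => d.insert kv.1 kv.2) PySem.Dict.empty
  let total := shop.values.sum
  let wins := (PySem.List.pyRange 0 ((discount.length : Int) - 9) 1).map
      (fun j => PySem.List.slice discount (some j) (some (j + 10)))
  ((wins.filter (fun w => solutionCovered shop w == total)).length : Int)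

-- ===== PRECONDITION & SPEC =====
-- Pre_ excludes only the inputs where A raises: number shorter than want makes A's number[i] an IndexError.
def Pre_solution (want : List String) (number : List Int) (discount : List String) : Prop :=
  want.length ≤ number.length
instance (want : List String) (number : List Int) (discount : List String) : Decidable (Pre_solution want number discount) := by unfold Pre_solution; infer_instance
def pvWitness_solution : List String × List Int × List String :=
  (["a"], [1], ["a", "b", "a", "a", "c", "b", "a", "b", "c", "a", "b"])

def Spec_solution (want : List String) (number : List Int) (discount : List String) (out : Int) : Prop := out = solution_alt want number discount
instance (want : List String) (number : List Int) (discount : List String) (out : Int) : Decidable (Spec_solution want number discount out) := by unfold Spec_solution; infer_instance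

-- ===== CLAIM (what is proved, stated in full; the proofs are below) =====
def Claim_equal_solution : Prop := ∀ (want : List String) (number : List Int) (discount : List String), Dom_solution want number discount → Pre_solution want number discount → Spec_solution want number discount (solution want number discount)

-- ===== LEMMAS AND PROOFS =====

-- what is left of a requirement v after one window containing the item c times (B's summand)
def pvLeft (v : Int) (c : Nat) : Int := if v ≤ 0 then v else max (v - (c : Int)) 0

theorem pvLeft_zero (v : Int) : pvLeft v 0 = v := by
  unfold pvLeft; split_ifs <;> omega

theorem pvLeft_succ (v : Int) (c : Nat) (hv : 0 < v) : pvLeft (v - 1) c = pvLeft v (c + 1) := by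
  unfold pvLeft; push_cast; split_ifs <;> omega

theorem pvLeft_nonpos (v : Int) (c c' : Nat) (hv : v ≤ 0) : pvLeft v c = pvLeft v c' := by
  unfold pvLeft; simp [hv]

-- the decrement loop of check, characterized: every entry (k, v) ends at pvLeft v (win.count k)
theorem items_foldl_checkStep (win : List String) (d : PySem.Dict String Int)
    (hnd : d.keys.Nodup) :
    (win.foldl solutionCheckStep d).items
      = d.items.map (fun kv => (kv.1, pvLeft kv.2 (win.count kv.1))) := by
  induction win generalizing d with
  | nil =>
    simp [pvLeft_zero]
  | cons t rest ih =>
    rw [List.foldl_cons]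
    cases h : d.get? t with
    | none =>
      have hstep : solutionCheckStep d t = d := by simp [solutionCheckStep, h]
      rw [hstep, ih d hnd]
      apply List.map_congr_left
      intro kv hkv
      have hne : kv.1 ≠ t := by
        intro he
        have hmem := PySem.Dict.mem_keys_of_mem_items d hkv
        rw [he] at hmem
        exact ((PySem.Dict.get?_eq_none_iff_not_mem_keys d t).mp h) hmem
      simp [Ne.symm hne]
    | some v =>
      by_cases hv : v > 0
      · have hc : d.contains t = true := by
          rw [PySem.Dict.contains_eq_isSome_get?, h]; rfl
        have hstep : solutionCheckStep d t = d.insert t (v - 1) := by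
          simp [solutionCheckStep, h, hv]
        have hnd' : (d.insert t (v - 1)).keys.Nodup :=
          PySem.Dict.nodup_keys_insert d t (v - 1) hnd
        rw [hstep, ih _ hnd', PySem.Dict.items_insert_of_contains d (v - 1) hc, List.map_map]
        apply List.map_congr_left
        intro kv hkv
        by_cases he : kv.1 = t
        · have hv' : d.get? kv.1 = some kv.2 :=
            (PySem.Dict.get?_eq_some_iff_mem_items d kv.1 kv.2 hnd).mpr hkv
          have hvv : kv.2 = v := by rw [he] at hv'; rw [h] at hv'; exact (Option.some_inj.mp hv').symm
          simp only [Function.comp, he, beq_self_eq_true, if_pos, List.count_cons]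
          simp only [hvv]
          rw [pvLeft_succ v (rest.count t) hv]
        · have hbe : (kv.1 == t) = false := beq_false_of_ne he
          have hbe' : (t == kv.1) = false := beq_false_of_ne (Ne.symm he)
          simp [Function.comp, hbe, List.count_cons, hbe']
      · have hstep : solutionCheckStep d t = d := by
          simp [solutionCheckStep, h, hv]
        rw [hstep, ih d hnd]
        apply List.map_congr_left
        intro kv hkv
        by_cases he : kv.1 = t
        · have hv' : d.get? kv.1 = some kv.2 :=
            (PySem.Dict.get?_eq_some_iff_mem_items d kv.1 kv.2 hnd).mpr hkv
          have hvv : kv.2 = v := by rw [he] at hv'; rw [h] at hv'; exact (Option.some_inj.mp hv').symm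
          have : kv.2 ≤ 0 := by omega
          rw [pvLeft_nonpos kv.2 (rest.count kv.1) ((t :: rest).count kv.1) this]
        · have hbe' : (t == kv.1) = false := beq_false_of_ne (Ne.symm he)
          simp [List.count_cons, hbe']

-- what check leaves of an entry, in the subtraction form B's algebra uses
theorem pvLeft_eq (v : Int) (c : Nat) :
    pvLeft v c = v - (if 0 < v then min (c : Int) v else 0) := by
  unfold pvLeft; split_ifs <;> omega

theorem sum_map_sub {α : Type} (l : List α) (f g : α → Int) :
    (l.map (fun x => f x - g x)).sum = (l.map f).sum - (l.map g).sum := by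
  induction l with
  | nil => simp
  | cons x xs ih => simp only [List.map_cons, List.sum_cons, ih]; ring

-- a sum over shop.items of a function of the key only is a sum over shop.keys
theorem sum_items_eq_sum_keys (shop : PySem.Dict String Int) (G : String → Int) :
    (shop.keys.map G).sum
      = (shop.items.map (fun kv => G kv.1)).sum := by
  simp only [PySem.Dict.keys, List.map_map]
  rfl

-- two Nodup key lists carry the same sum of G when G vanishes off their intersection
theorem sum_nodup_congr (l₁ l₂ : List String) (G : String → Int)
    (h₁ : l₁.Nodup) (h₂ : l₂.Nodup)
    (z₁ : ∀ k ∈ l₁, k ∉ l₂ → G k = 0) (z₂ : ∀ k ∈ l₂, k ∉ l₁ → G k = 0) :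
    (l₁.map G).sum = (l₂.map G).sum := by
  rw [← List.sum_toFinset G h₁, ← List.sum_toFinset G h₂]
  have e1 : ∑ x ∈ l₁.toFinset ∩ l₂.toFinset, G x = ∑ x ∈ l₁.toFinset, G x :=
    Finset.sum_subset Finset.inter_subset_left
      (by intro x hx hnx
          simp only [List.mem_toFinset, Finset.mem_inter] at hx hnx
          exact z₁ x hx (fun h => hnx ⟨hx, h⟩))
  have e2 : ∑ x ∈ l₁.toFinset ∩ l₂.toFinset, G x = ∑ x ∈ l₂.toFinset, G x :=
    Finset.sum_subset Finset.inter_subset_right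
      (by intro x hx hnx
          simp only [List.mem_toFinset, Finset.mem_inter] at hx hnx
          exact z₂ x hx (fun h => hnx ⟨h, hx⟩))
  rw [← e1, e2]

-- B's covered total, rewritten as a sum over the shop's entries
theorem covered_eq (shop : PySem.Dict String Int) (win : List String)
    (hnd : shop.keys.Nodup) :
    solutionCovered shop win
      = (shop.items.map (fun kv => if 0 < kv.2 then min ((win.count kv.1 : Int)) kv.2 else 0)).sum := by
  unfold solutionCovered
  rw [PySem.Dict.foldl_insert_getD_add_one_eq_counter]
  dsimp only
  rw [PySem.Dict.items_counter, List.foldl_map]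
  dsimp only
  have hco : List.foldl
        (fun x y => if 0 < shop.getD y 0 then x + min ((List.count y win : Int)) (shop.getD y 0) else x)
        0 (PySem.Set.ofList win)
      = List.foldl
        (fun s k => s + (if 0 < shop.getD k 0 then min ((List.count k win : Int)) (shop.getD k 0) else 0))
        0 (PySem.Set.ofList win) :=
    PySem.List.foldl_congr_mem _ _ _ 0
      (by intro acc k _; by_cases h : 0 < shop.getD k 0 <;> simp [h])
  rw [hco, PySem.List.foldl_add, zero_add]
  have hr : shop.items.map (fun kv => if 0 < kv.2 then min ((win.count kv.1 : Int)) kv.2 else 0)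
      = shop.items.map
          (fun kv => if 0 < shop.getD kv.1 0 then min ((List.count kv.1 win : Int)) (shop.getD kv.1 0) else 0) := by
    apply List.map_congr_left
    intro kv hkv
    rw [PySem.Dict.getD_of_mem_items shop (by simpa using hkv) hnd 0]
  rw [hr, ← sum_items_eq_sum_keys shop
        (fun k => if 0 < shop.getD k 0 then min ((List.count k win : Int)) (shop.getD k 0) else 0)]
  apply sum_nodup_congr _ _ _ (PySem.Set.nodup_ofList win) hnd
  · intro k hk hnk
    have hc : shop.contains k = false := by
      rcases h : shop.contains k with _ | _
      · rfl
      · exact absurd ((PySem.Dict.contains_iff_mem_keys shop k).mp h) hnk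
    rw [PySem.Dict.getD_of_not_contains shop 0 hc]
    simp
  · intro k hk hnk
    have hz : List.count k win = 0 :=
      List.count_eq_zero.mpr (fun hm => hnk ((PySem.Set.mem_ofList win k).mpr hm))
    rw [hz]
    by_cases h : 0 < shop.getD k 0 <;> simp [h]
    omega

-- A's check answers exactly "B's covered total reaches the full requirement"
theorem check_eq_covered (shop : PySem.Dict String Int) (win : List String)
    (hnd : shop.keys.Nodup) :
    solutionCheck shop win = (solutionCovered shop win == shop.values.sum) := by
  have h1 : (win.foldl solutionCheckStep shop).values.sum
      = shop.values.sum - solutionCovered shop win := by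
    simp only [PySem.Dict.values]
    rw [items_foldl_checkStep win shop hnd, List.map_map, covered_eq shop win hnd]
    rw [List.map_congr_left (l := shop.items)
        (g := fun kv => kv.2 - (if 0 < kv.2 then min ((win.count kv.1 : Int)) kv.2 else 0))
        (by intro kv _; exact pvLeft_eq kv.2 (win.count kv.1)),
      sum_map_sub]
  unfold solutionCheck
  by_cases h : solutionCovered shop win = shop.values.sum
  · simp [h1, h]
  · have hz : ¬(shop.values.sum - solutionCovered shop win = 0) := by omega
    simp [h1, hz, h]

-- A's index-built shop dict is B's zip-built shop dict (under Pre_)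
theorem shop_eq (want : List String) (number : List Int) (hpre : want.length ≤ number.length) :
    (PySem.List.pyRange 0 (want.length : Int) 1).foldl
      (fun shop i => shop.insert (PySem.List.pyGetD want i "") (PySem.List.pyGetD number i 0))
      PySem.Dict.empty
    = (want.zip number).foldl (fun d kv => d.insert kv.1 kv.2) PySem.Dict.empty := by
  have hlen : (want.zip number).length = want.length := by
    rw [List.length_zip]; omega
  have h1 : (PySem.List.pyRange 0 (want.length : Int) 1).foldl
      (fun shop i => shop.insert (PySem.List.pyGetD want i "") (PySem.List.pyGetD number i 0))
      PySem.Dict.empty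
    = (PySem.List.pyRange 0 ((want.zip number).length : Int) 1).foldl
      (fun d i => d.insert (PySem.List.pyGetD (want.zip number) i ("", 0)).1
                           (PySem.List.pyGetD (want.zip number) i ("", 0)).2)
      PySem.Dict.empty := by
    rw [hlen]
    apply PySem.List.foldl_congr_mem
    intro acc i hi
    have hi' := (PySem.List.mem_pyRange_one).mp hi
    have h0 : 0 ≤ i := hi'.1
    have hw : i < (want.length : Int) := hi'.2
    have hz : i.toNat < (want.zip number).length := by rw [hlen]; omega
    rw [PySem.List.pyGetD_eq_getElem want "" h0 (by exact_mod_cast hw),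
        PySem.List.pyGetD_eq_getElem number 0 h0 (by omega),
        PySem.List.pyGetD_eq_getElem (want.zip number) ("", 0) h0 (by omega)]
    rw [List.getElem_zip]
  rw [h1]
  exact PySem.List.foldl_pyRange_zero_pyGetD (want.zip number) ("", 0)
    (fun d kv => d.insert kv.1 kv.2) PySem.Dict.empty

-- ===== VERDICT (by name: the statement is the Claim_ definition above) =====
theorem solution_spec : Claim_equal_solution := by
  intro want number discount _ hpre
  show solution want number discount = solution_alt want number discount
  unfold solution solution_alt
  dsimp only
  rw [shop_eq want number hpre]
  set shop := (want.zip number).foldl (fun d kv => d.insert kv.1 kv.2) PySem.Dict.empty with hshop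
  have hnd : shop.keys.Nodup := by
    rw [hshop]
    exact PySem.Dict.nodup_keys_foldl_insert_key (want.zip number) Prod.fst
      (fun _ kv => kv.2) PySem.Dict.empty PySem.Dict.nodup_keys_empty
  rw [PySem.List.foldl_if_add_one
      (fun j => solutionCheck shop (PySem.List.slice discount (some j) (some (j + 10))))]
  rw [List.filter_map, List.length_map, ← List.countP_eq_length_filter]
  have : (fun j => solutionCheck shop (PySem.List.slice discount (some j) (some (j + 10))))
       = ((fun w => solutionCovered shop w == shop.values.sum)
            ∘ (fun j => PySem.List.slice discount (some j) (some (j + 10)))) := by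
    funext j
    exact check_eq_covered shop _ hnd
  rw [this]
  omega
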